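-- pv_equiv track=rewrite | github.com/margaridagsl/athenian-api | server/athenian/api/controllers/miners/github/release.py | _traverse_commits
-- ===== SOURCE A (Python) =====
-- from typing import Collection, Dict, Iterable, List, Mapping, Optional, Sequence, Set, Tuple, Union
--
-- def _traverse_commits(dag: Dict[str, List[str]],
--                       root: str,
--                       stops: Set[str]) -> Tuple[Set[str], Set[str], Set[str]]:
--     parents = [root]
--     visited = set()
--     boundaries = set()
--     leaves = set()
--     while parents:
--         x = parents.pop()
--         if x in visited:
--             continue
--         if x in stops and x != root:
--             boundaries.add(x)
--             continue
--         try: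
--             children = dag[x]
--             parents.extend(children)
--         except KeyError:
--             leaves.add(x)
--             continue
--         visited.add(x)
--     return visited, boundaries, leaves
-- ===== SOURCE B (Python) =====
-- def _traverse_commits(dag, root, stops):
--     # Recursive DFS decomposition of the same traversal; children are visited
--     # in reversed order, which is the order the stack version pops them in
--     # (invisible in the returned sets, which are unordered).
--     visited = set()
--     boundaries = set()
--     leaves = set()
--
--     def traverse(x):
--         if x in visited:
--             return
--         if x in stops and x != root:
--             boundaries.add(x)
--             return
--         try:
--             children = dag[x]
--         except KeyError:
--             leaves.add(x)
--             return
--         visited.add(x)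
--         for child in reversed(children):
--             traverse(child)
--
--     traverse(root)
--     return visited, boundaries, leaves
-- ===== Notes on version B (the rewrite author's own statement) =====
-- stated objective: alternative
-- what changed: Replaces A's explicit-stack while-loop (pop from a worklist, extend with children) by a recursive DFS helper traverse(x) called once on the root, recursing over each node's children (in reversed order, invisible in the returned sets); same three sets and the same four branch conditions, but the traversal state lives on the call stack instead of an explicit parents list.
import Mathlib
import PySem

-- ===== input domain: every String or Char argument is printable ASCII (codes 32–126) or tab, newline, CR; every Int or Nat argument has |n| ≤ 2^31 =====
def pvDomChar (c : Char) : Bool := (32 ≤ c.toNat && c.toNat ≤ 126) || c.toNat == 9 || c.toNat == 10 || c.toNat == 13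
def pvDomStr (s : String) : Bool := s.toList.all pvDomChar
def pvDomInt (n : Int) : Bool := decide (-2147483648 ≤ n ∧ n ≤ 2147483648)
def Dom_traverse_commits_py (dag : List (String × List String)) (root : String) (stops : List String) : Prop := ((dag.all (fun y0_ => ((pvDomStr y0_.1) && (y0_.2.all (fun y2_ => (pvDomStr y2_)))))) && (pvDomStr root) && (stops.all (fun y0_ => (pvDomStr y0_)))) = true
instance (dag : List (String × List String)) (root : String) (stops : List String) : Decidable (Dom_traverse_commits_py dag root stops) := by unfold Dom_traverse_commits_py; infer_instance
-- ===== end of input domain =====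

-- B replaces A's explicit-stack worklist loop with a recursive DFS helper (same four
-- branch conditions, children recursed in reversed order): a different decomposition
-- of the same traversal, not faster ('alternative').


-- ===== PORT A =====
-- Termination helper for A's while loop: expanding an unvisited key of the dag
-- strictly shrinks the number of dag keys not yet visited.
theorem pvKeyFilterLt {keys : List String} {visited : PySem.Set String} {x : String}
    (hx : x ∈ keys) (hnv : visited.contains x = false) :
    (keys.filter (fun k => !(PySem.Set.add visited x).contains k)).length <
      (keys.filter (fun k => !visited.contains k)).length := by
  have hnv' : x ∉ visited := by simpa using hnv
  have hsub : (keys.filter (fun k => !(PySem.Set.add visited x).contains k)).Sublist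
      (keys.filter (fun k => !visited.contains k)) := by
    apply List.monotone_filter_right
    intro a ha
    simp only [PySem.Set.add, hnv, Bool.false_eq_true, if_false] at ha
    simp at ha ⊢
    tauto
  refine Nat.lt_of_le_of_ne hsub.length_le (fun hlen => ?_)
  have heq := hsub.eq_of_length hlen
  have hxmem : x ∈ keys.filter (fun k => !visited.contains k) := by
    simp [List.mem_filter, hx, hnv']
  rw [← heq] at hxmem
  simp [List.mem_filter, PySem.Set.add, hnv'] at hxmem

-- a key looked up successfully is a key of the dag
theorem pvMemKeys {dag : List (String × List String)} {x : String} {v : List String}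
    (h : PySem.Dict.get? (PySem.Dict.mk dag) x = some v) : x ∈ dag.map Prod.fst := by
  have h1 := PySem.Dict.mem_items_of_get?_eq_some _ h
  have h2 := PySem.Dict.mem_keys_of_mem_items _ h1
  simpa [PySem.Dict.keys] using h2

-- the while loop of A: parents is the explicit stack (pop = last element)
def pvLoopA (dag : List (String × List String)) (root : String) (stops : List String)
    (parents : List String) (visited boundaries leaves : PySem.Set String) :
    List String × List String × List String :=
  if h : parents = [] then (visited, boundaries, leaves)
  else
    let x := parents.getLast h
    let rest := parents.dropLast
    if visited.contains x then
      pvLoopA dag root stops rest visited boundaries leaves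
    else if stops.contains x && !(x == root) then
      pvLoopA dag root stops rest visited (boundaries.add x) leaves
    else
      match hget : PySem.Dict.get? (PySem.Dict.mk dag) x with
      | none => pvLoopA dag root stops rest visited boundaries (leaves.add x)
      | some children =>
          pvLoopA dag root stops (rest ++ children) (visited.add x) boundaries leaves
termination_by
  (((dag.map Prod.fst).filter (fun k => !visited.contains k)).length, parents.length)
decreasing_by
  · apply Prod.Lex.right
    have := List.length_pos_of_ne_nil h
    simp [List.length_dropLast]; omega
  · apply Prod.Lex.right
    have := List.length_pos_of_ne_nil h
    simp [List.length_dropLast]; omega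
  · apply Prod.Lex.right
    have := List.length_pos_of_ne_nil h
    simp [List.length_dropLast]; omega
  · apply Prod.Lex.left
    apply pvKeyFilterLt
    · exact pvMemKeys hget
    · simpa using ‹¬ visited.contains _ = true›

def traverse_commits_py (dag : List (String × List String)) (root : String)
    (stops : List String) : List String × List String × List String :=
  pvLoopA dag root stops [root] PySem.Set.empty PySem.Set.empty PySem.Set.empty

-- ===== PORT B =====
-- the recursive helper 'traverse' of Source B; the fuel argument only makes the
-- recursion structural (it is always called with enough fuel, dag.length + 1,
-- since each recursion level marks a fresh dag key as visited)
def pvTraverse (dag : List (String × List String)) (root : String) (stops : List String) :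
    Nat → String → PySem.Set String × PySem.Set String × PySem.Set String →
    PySem.Set String × PySem.Set String × PySem.Set String
  | 0, _, st => st
  | Nat.succ n, x, st =>
    if st.1.contains x then st
    else if stops.contains x && !(x == root) then (st.1, st.2.1.add x, st.2.2)
    else
      match PySem.Dict.get? (PySem.Dict.mk dag) x with
      | none => (st.1, st.2.1, st.2.2.add x)
      | some children =>
          children.reverse.foldl (fun s c => pvTraverse dag root stops n c s)
            (st.1.add x, st.2.1, st.2.2)

def traverse_commits_py_alt (dag : List (String × List String)) (root : String)
    (stops : List String) : List String × List String × List String :=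
  pvTraverse dag root stops (dag.length + 1) root
    (PySem.Set.empty, PySem.Set.empty, PySem.Set.empty)

-- ===== PRECONDITION & SPEC =====
def Spec_traverse_commits_py (dag : List (String × List String)) (root : String) (stops : List String) (out : List String × List String × List String) : Prop := out = traverse_commits_py_alt dag root stops
instance (dag : List (String × List String)) (root : String) (stops : List String) (out : List String × List String × List String) : Decidable (Spec_traverse_commits_py dag root stops out) := by unfold Spec_traverse_commits_py; infer_instance

-- ===== CLAIM (what is proved, stated in full; the proofs are below) =====
def Claim_equal_traverse_commits_py : Prop := ∀ (dag : List (String × List String)) (root : String) (stops : List String), Dom_traverse_commits_py dag root stops → Spec_traverse_commits_py dag root stops (traverse_commits_py dag root stops)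

-- ===== LEMMAS AND PROOFS =====

-- number of dag keys not yet visited
def pvU (dag : List (String × List String)) (v : PySem.Set String) : Nat :=
  ((dag.map Prod.fst).filter (fun k => !v.contains k)).length

theorem pvU_le_len (dag : List (String × List String)) (v : PySem.Set String) :
    pvU dag v ≤ dag.length := by
  calc pvU dag v ≤ (dag.map Prod.fst).length := List.length_filter_le _ _
    _ = dag.length := List.length_map ..

theorem pvContainsAdd (s : PySem.Set String) (x k : String) (h : s.contains k = true) :
    (PySem.Set.add s x).contains k = true := by
  simp [PySem.Set.add]; split <;> simp_all

-- visited only grows under pvTraverse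
theorem pvMono (dag : List (String × List String)) (root : String) (stops : List String) :
    ∀ (n : Nat) (x : String) st (k : String), st.1.contains k = true →
      (pvTraverse dag root stops n x st).1.contains k = true := by
  intro n
  induction n with
  | zero => intro x st k hk; simpa [pvTraverse] using hk
  | succ n ih =>
    have hfold : ∀ (cs : List String) st (k : String), st.1.contains k = true →
        (cs.foldl (fun s c => pvTraverse dag root stops n c s) st).1.contains k = true := by
      intro cs
      induction cs with
      | nil => intro st k hk; simpa using hk
      | cons c cs ihc => intro st k hk; exact ihc _ _ (ih c st k hk)
    intro x st k hk
    simp only [pvTraverse]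
    split_ifs with h1 h2
    · exact hk
    · exact hk
    · match hget : PySem.Dict.get? (PySem.Dict.mk dag) x with
      | none => exact hk
      | some children =>
          exact hfold _ _ _ (pvContainsAdd st.1 x k hk)

theorem pvU_anti (dag : List (String × List String)) (root : String) (stops : List String)
    (n : Nat) (x : String) (st : PySem.Set String × PySem.Set String × PySem.Set String) :
    pvU dag (pvTraverse dag root stops n x st).1 ≤ pvU dag st.1 := by
  apply List.Sublist.length_le
  apply List.monotone_filter_right
  intro a ha
  simp only [Bool.not_eq_true'] at ha ⊢
  by_contra hc
  simp only [Bool.not_eq_false] at hc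
  have := pvMono dag root stops n x st a hc
  simp_all

-- fuel irrelevance: with fuel above the number of unvisited keys the result is fuel-free
theorem pvFI (dag : List (String × List String)) (root : String) (stops : List String) :
    ∀ (n : Nat), ∀ (m : Nat) (x : String) st, pvU dag st.1 < n → pvU dag st.1 < m →
      pvTraverse dag root stops n x st = pvTraverse dag root stops m x st := by
  intro n
  induction n using Nat.strong_induction_on with
  | _ n ih =>
    intro m x st hn hm
    match n, m with
    | 0, _ => omega
    | _ + 1, 0 => omega
    | n + 1, m + 1 =>
      simp only [pvTraverse]
      split_ifs with h1 h2
      · rfl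
      · rfl
      · match hget : PySem.Dict.get? (PySem.Dict.mk dag) x with
        | none => rfl
        | some children =>
          have hxkey : x ∈ dag.map Prod.fst := pvMemKeys hget
          have hnv : st.1.contains x = false := by simpa using h1
          have hdrop : pvU dag (st.1.add x) < pvU dag st.1 := pvKeyFilterLt hxkey hnv
          have hfold : ∀ (cs : List String) st',
              pvU dag st'.1 < n → pvU dag st'.1 < m →
              cs.foldl (fun s c => pvTraverse dag root stops n c s) st' =
              cs.foldl (fun s c => pvTraverse dag root stops m c s) st' := by
            intro cs
            induction cs with
            | nil => intro st' _ _; rfl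
            | cons c cs ihc =>
              intro st' hn' hm'
              simp only [List.foldl_cons]
              rw [← ih n (Nat.lt_succ_self n) m c st' hn' hm']
              apply ihc
              · exact Nat.lt_of_le_of_lt (pvU_anti dag root stops n c st') hn'
              · exact Nat.lt_of_le_of_lt (pvU_anti dag root stops n c st') hm'
          exact hfold children.reverse _
            (by show pvU dag (st.1.add x) < n; omega)
            (by show pvU dag (st.1.add x) < m; omega)

-- folding pvTraverse from the right is fuel-irrelevant too
theorem pvFoldrFI (dag : List (String × List String)) (root : String) (stops : List String)
    (n m : Nat) :
    ∀ (cs : List String) st, pvU dag st.1 < n → pvU dag st.1 < m →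
      cs.foldr (fun c s => pvTraverse dag root stops n c s) st =
      cs.foldr (fun c s => pvTraverse dag root stops m c s) st := by
  intro cs
  induction cs with
  | nil => intro st _ _; rfl
  | cons c cs ihc =>
    intro st hn hm
    simp only [List.foldr_cons]
    rw [ihc st hn hm]
    apply pvFI
    · calc pvU dag (cs.foldr (fun c s => pvTraverse dag root stops m c s) st).1
          ≤ pvU dag st.1 := by
            clear ihc hn hm
            induction cs generalizing st with
            | nil => exact le_rfl
            | cons c' cs' ih' =>
              simp only [List.foldr_cons]
              exact le_trans (pvU_anti dag root stops m c' _) (ih' st)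
        _ < n := hn
    · calc pvU dag (cs.foldr (fun c s => pvTraverse dag root stops m c s) st).1
          ≤ pvU dag st.1 := by
            clear ihc hn hm
            induction cs generalizing st with
            | nil => exact le_rfl
            | cons c' cs' ih' =>
              simp only [List.foldr_cons]
              exact le_trans (pvU_anti dag root stops m c' _) (ih' st)
        _ < m := hm

-- main simulation: A's stack loop is B's traverse folded over the stack from its top
theorem pvLoopA_eq_foldr (dag : List (String × List String)) (root : String)
    (stops : List String) :
    ∀ (parents : List String) (v b l : PySem.Set String),
      pvLoopA dag root stops parents v b l =
      parents.foldr (fun x s => pvTraverse dag root stops (dag.length + 1) x s) (v, b, l) := by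
  intro parents v b l
  induction parents, v, b, l using pvLoopA.induct dag root stops with
  | case1 v b l => simp [pvLoopA]
  | case2 parents v b l h x rest hvis ih =>
    conv_rhs => rw [← List.dropLast_append_getLast h, List.foldr_append]
    simp only [List.foldr_cons, List.foldr_nil]
    rw [pvLoopA]
    simp only [dif_neg h]
    rw [if_pos hvis]
    rw [(ih : pvLoopA dag root stops parents.dropLast v b l = _)]
    congr 1
    simp only [pvTraverse]
    rw [if_pos hvis]
  | case3 parents v b l h x rest hvis hstop ih =>
    conv_rhs => rw [← List.dropLast_append_getLast h, List.foldr_append]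
    simp only [List.foldr_cons, List.foldr_nil]
    rw [pvLoopA]
    simp only [dif_neg h]
    rw [if_neg hvis, if_pos hstop]
    rw [(ih : pvLoopA dag root stops parents.dropLast v (b.add (parents.getLast h)) l = _)]
    congr 1
    simp only [pvTraverse]
    rw [if_neg hvis, if_pos hstop]
  | case4 parents v b l h x rest hvis hstop hget ih =>
    conv_rhs => rw [← List.dropLast_append_getLast h, List.foldr_append]
    simp only [List.foldr_cons, List.foldr_nil]
    rw [pvLoopA]
    simp only [dif_neg h]
    rw [if_neg hvis, if_neg hstop]
    split
    next heq =>
      rw [(ih : pvLoopA dag root stops parents.dropLast v b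
            (l.add (parents.getLast h)) = _)]
      congr 1
      simp only [pvTraverse]
      rw [if_neg hvis, if_neg hstop]
      simp only [heq]
      rfl
    next children' heq => exact absurd (hget.symm.trans heq) (by simp)
  | case5 parents v b l h x rest hvis hstop children hget ih =>
    conv_rhs => rw [← List.dropLast_append_getLast h, List.foldr_append]
    simp only [List.foldr_cons, List.foldr_nil]
    rw [pvLoopA]
    simp only [dif_neg h]
    rw [if_neg hvis, if_neg hstop]
    split
    next heq => exact absurd (hget.symm.trans heq) (by simp)
    next children' heq =>
    have hc : children = children' := Option.some.inj (hget.symm.trans heq)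
    subst hc
    rw [(ih : pvLoopA dag root stops (parents.dropLast ++ children)
          (v.add (parents.getLast h)) b l = _)]
    rw [List.foldr_append]
    congr 1
    have hxkey : (parents.getLast h) ∈ dag.map Prod.fst := pvMemKeys hget
    have hnv : v.contains (parents.getLast h) = false := by simpa using hvis
    have hdrop : pvU dag (v.add (parents.getLast h)) < pvU dag v := pvKeyFilterLt hxkey hnv
    have hUle : pvU dag v ≤ dag.length := pvU_le_len dag v
    simp only [pvTraverse]
    rw [if_neg hvis, if_neg hstop]
    simp only [heq]
    rw [List.foldl_reverse]
    exact (pvFoldrFI dag root stops dag.length (dag.length + 1)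
      children (v.add (parents.getLast h), b, l)
      (by show pvU dag (v.add (parents.getLast h)) < dag.length; omega)
      (by show pvU dag (v.add (parents.getLast h)) < dag.length + 1; omega)).symm


-- ===== VERDICT (by name: the statement is the Claim_ definition above) =====
theorem traverse_commits_py_spec : Claim_equal_traverse_commits_py := by
  intro dag root stops _
  unfold Spec_traverse_commits_py traverse_commits_py traverse_commits_py_alt
  rw [pvLoopA_eq_foldr]
  rfl
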